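-- pv_equiv track=rewrite | github.com/barbaralam/mimicpe | notebooks/section_parser.py | combine_equivalent_sections
-- ===== SOURCE A (Python) =====
-- def combine_equivalent_sections(section_names, sections):
--     """
--         e.g.,
--             section_names = ['findings', 'incidental findings']
--             sections = ['1', '2']
--             ->
--             section_naems = ['findings']
--             sections = ['1\n2']
--     """
--
--     same_section_names = [
--         ('findings', 'incidental findings', 'chest findings', 'chest ct findings', 'abdomen findings', 'neck findings', 'abdomen and pelvis findings', 'abdomen/pelvis findings', 'abdominal findings', 'vascular findings', 'non-vascular findings', 'ct abdomen/pelvis', 'chest and abdomen vascular', 'ct chest', 'ct chest findings', 'extracardiac findings', 'non vascular findings', 'nonvascular findings', 'non-coronary cardiac findings', 'head ct findings', 'cervical spine findings', 'cervical spine ct findings',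
--         # cta
--         'cta',
--         'cta thorax',
--         'cta head',
--         'cta neck',
--         'cta chest',
--         'ct thorax',
--         'ct of the thorax',
--         'ct abdomen',
--         'ct pelvis',
--         'ct pulmonary angiogram',
--         'ct abdomen with contrast',
--         'ct pelvis with contrast',
--         'ct angiogram',
--         'ct of the chest',
--         'ct abdomen with intravenous contrast',
--         'ct pelvis with intravenous contrast',
--         'ct of the chest with intravenous contrast',
--         'ct of the abdomen with intravenous contrast',
--         'ct of the pelvis with intravenous contrast',
--         'ct of the abdomen with',
--         'ct of the abdomen with contrast',
--         'ct pulmonary angiogram without and with iv contrast',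
--         'cta of the of the chest without and with intravenous contrast',
--         'cta the abdomen',
--         'cta mesentery',
--         'cta chest with contrast and reconstructions',
--         'cta abdomen',
--         'cta pelvis',
--         'cta of the chest without and with intravenous contrast',
--         'cta chest with contrast',
--         'cta chest',
--         'chest cta',
--         'ct of the chest without and with intravenous contrast',
--         'ct chest without and with iv contrast',
--         'ct chest with and without contrast',
--         'ct abdomen with iv contrast',
--         'cta of the chest',
--         'ct chest with contrast',
--         'ct of the chest with and without intravenous contrast',
--         ), # merge later sections into the first section listed.
--     ]
--
--     for same_sections in same_section_names:
--
--         section_name_canonical = same_sections[0]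
--
--         sections_combine = list(filter(lambda l: l[0] in same_sections, zip(section_names, sections)))
--         if not (len(sections_combine) > 1 or (len(sections_combine)==1 and sections_combine[0][0]!=section_name_canonical)):
--             continue
--         sections_rest = list(filter(lambda l: l[0] not in same_sections, zip(section_names, sections)))
--
--         idx = None
--         for i in range(len(section_names)):
--             if section_names[i] in same_sections:
--                 idx = i
--                 break
--
--         t = (section_name_canonical, '\n'.join([f'{k.upper()}:\n{v}' if k!=section_name_canonical else v for k, v in sections_combine]))
--         sections_rest.insert(idx, t)
--
--
--         section_names, sections = list(zip(*sections_rest))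
--
--     return section_names, sections
-- ===== SOURCE B (Python) =====
-- _SYNONYMS = frozenset(('findings', 'incidental findings', 'chest findings', 'chest ct findings', 'abdomen findings', 'neck findings', 'abdomen and pelvis findings', 'abdomen/pelvis findings', 'abdominal findings', 'vascular findings', 'non-vascular findings', 'ct abdomen/pelvis', 'chest and abdomen vascular', 'ct chest', 'ct chest findings', 'extracardiac findings', 'non vascular findings', 'nonvascular findings', 'non-coronary cardiac findings', 'head ct findings', 'cervical spine findings', 'cervical spine ct findings', 'cta', 'cta thorax', 'cta head', 'cta neck', 'cta chest', 'ct thorax', 'ct of the thorax', 'ct abdomen', 'ct pelvis', 'ct pulmonary angiogram', 'ct abdomen with contrast', 'ct pelvis with contrast', 'ct angiogram', 'ct of the chest', 'ct abdomen with intravenous contrast', 'ct pelvis with intravenous contrast', 'ct of the chest with intravenous contrast', 'ct of the abdomen with intravenous contrast', 'ct of the pelvis with intravenous contrast', 'ct of the abdomen with', 'ct of the abdomen with contrast', 'ct pulmonary angiogram without and with iv contrast', 'cta of the of the chest without and with intravenous contrast', 'cta the abdomen', 'cta mesentery', 'cta chest with contrast and reconstructions', 'cta abdomen', 'cta pelvis',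 'cta of the chest without and with intravenous contrast', 'cta chest with contrast', 'cta chest', 'chest cta', 'ct of the chest without and with intravenous contrast', 'ct chest without and with iv contrast', 'ct chest with and without contrast', 'ct abdomen with iv contrast', 'cta of the chest', 'ct chest with contrast', 'ct of the chest with and without intravenous contrast'))
-- _CANONICAL = 'findings'
--
--
-- def combine_equivalent_sections(section_names, sections):
--     # One pass over zip(section_names, sections): partition into rest / formatted
--     # combine texts, recording the insert position at the first match.
--     rest = []
--     combine = []
--     first = None  # (position in rest at first match, first matching name)
--     for name, text in zip(section_names, sections):
--         if name in _SYNONYMS: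
--             if first is None:
--                 first = (len(rest), name)
--             combine.append(text if name == _CANONICAL else name.upper() + ':\n' + text)
--         else:
--             rest.append((name, text))
--     if len(combine) > 1 or (len(combine) == 1 and first[1] != _CANONICAL):
--         rest.insert(first[0], (_CANONICAL, '\n'.join(combine)))
--         return tuple(n for n, _ in rest), tuple(t for _, t in rest)
--     return section_names, sections
-- ===== Notes on version B (the rewrite author's own statement) =====
-- stated objective: faster
-- what changed: Replaces A's two filter passes over the zipped pairs plus a separate index-hunting loop (and the outer loop over the one-group table) with a single pass that partitions, formats and records the insert position at the first match.
import Mathlib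
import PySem

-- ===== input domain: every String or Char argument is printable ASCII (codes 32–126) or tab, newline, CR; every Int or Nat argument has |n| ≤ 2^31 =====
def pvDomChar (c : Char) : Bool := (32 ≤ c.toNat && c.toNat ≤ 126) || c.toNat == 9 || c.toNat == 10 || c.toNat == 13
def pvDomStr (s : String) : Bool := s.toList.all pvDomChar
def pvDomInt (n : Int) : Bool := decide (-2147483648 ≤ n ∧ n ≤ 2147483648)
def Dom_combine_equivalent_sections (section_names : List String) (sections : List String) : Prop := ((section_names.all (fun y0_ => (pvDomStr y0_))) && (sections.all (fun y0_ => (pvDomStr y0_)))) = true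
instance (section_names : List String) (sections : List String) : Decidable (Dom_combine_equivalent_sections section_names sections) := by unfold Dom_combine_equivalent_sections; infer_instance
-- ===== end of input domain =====

-- B replaces A's two filter passes plus a separate first-index loop by one pass over
-- zip(section_names, sections); same return value, one pass instead of three (measured faster).

-- ===== PORT A =====
-- the single synonym group from A's same_section_names table (shared data constant)
def pvSynonyms : List String := ["findings", "incidental findings", "chest findings", "chest ct findings", "abdomen findings", "neck findings", "abdomen and pelvis findings", "abdomen/pelvis findings", "abdominal findings", "vascular findings", "non-vascular findings", "ct abdomen/pelvis", "chest and abdomen vascular", "ct chest", "ct chest findings", "extracardiac findings", "non vascular findings", "nonvascular findings", "non-coronary cardiac findings", "head ct findings", "cervical spine findings", "cervical spine ct findings", "cta", "cta thorax", "cta head", "cta neck", "cta chest", "ct thorax", "ct of the thorax", "ct abdomen", "ct pelvis", "ct pulmonary angiogram", "ct abdomen with contrast", "ct pelvis with contrast", "ct angiogram", "ct of the chest", "ct abdomen with intravenous contrast", "ct pelvis with intravenous contrast", "ct of the chest with intravenous contrast", "ct of the abdomen with intravenous contrast", "ct of the pelvis with intravenous contrast", "ct of the abdomen with", "ct of the abdomen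 with contrast", "ct pulmonary angiogram without and with iv contrast", "cta of the of the chest without and with intravenous contrast", "cta the abdomen", "cta mesentery", "cta chest with contrast and reconstructions", "cta abdomen", "cta pelvis", "cta of the chest without and with intravenous contrast", "cta chest with contrast", "cta chest", "chest cta", "ct of the chest without and with intravenous contrast", "ct chest without and with iv contrast", "ct chest with and without contrast", "ct abdomen with iv contrast", "cta of the chest", "ct chest with contrast", "ct of the chest with and without intravenous contrast"]

-- the f-string body of A's join comprehension (B's loop formats with the same expression)
def pvFmt (k : String) (v : String) : String :=
  if k ≠ "findings" then PySem.Str.upper k ++ ":\n" ++ v else v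

-- A's 'for i in range(len(section_names)): if section_names[i] in same_sections: idx = i; break'
def pvFindIdxA (same : List String) : List String → Nat → Option Nat
  | [], _ => none
  | n :: rest, i => if same.contains n then some i else pvFindIdxA same rest (i + 1)

-- A's loop body for one group 'same_sections' (the table has exactly one group, so the
-- outer for-loop is a foldl over the singleton list [pvSynonyms])
def pvStepA (state : List String × List String) (same : List String) : List String × List String :=
  let section_names := state.1
  let sections := state.2
  let canon := same.headD ""
  let pairs := section_names.zip sections
  let combine := pairs.filter (fun l => same.contains l.1)
  if ¬ (combine.length > 1 ∨ (combine.length = 1 ∧ (combine.headD ("", "")).1 ≠ canon)) then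
    (section_names, sections)   -- 'continue'
  else
    let rest := pairs.filter (fun l => !(same.contains l.1))
    -- idx is some i here (the guard implies a match exists); getD 0 is unreachable
    let idx := (pvFindIdxA same section_names 0).getD 0
    let t := (canon, PySem.Str.join "\n" (combine.map (fun p => pvFmt p.1 p.2)))
    let rest' := PySem.List.insert rest (idx : Int) t
    (rest'.map Prod.fst, rest'.map Prod.snd)   -- list(zip(*sections_rest)), rest' nonempty

def combine_equivalent_sections (section_names : List String) (sections : List String) : List String × List String :=
  [pvSynonyms].foldl pvStepA (section_names, sections)

-- ===== PORT B =====
-- loop body of B's single pass; state = (rest, combine, first) with first = (pos, name) at the first match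
def pvStepB (state : List (String × String) × List String × Option (Nat × String))
    (p : String × String) : List (String × String) × List String × Option (Nat × String) :=
  let rest := state.1
  let combine := state.2.1
  let first := state.2.2
  if pvSynonyms.contains p.1 then
    let first := match first with
      | none => some (rest.length, p.1)
      | some f => some f
    (rest, combine ++ [pvFmt p.1 p.2], first)
  else
    (rest ++ [p], combine, first)

def combine_equivalent_sections_alt (section_names : List String) (sections : List String) : List String × List String :=
  let st := (section_names.zip sections).foldl pvStepB ([], [], none)
  let rest := st.1
  let combine := st.2.1
  let first := st.2.2
  if combine.length > 1 ∨ (combine.length = 1 ∧ (first.getD (0, "")).2 ≠ "findings") then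
    let rest' := PySem.List.insert rest (((first.getD (0, "")).1 : Nat) : Int)
      ("findings", PySem.Str.join "\n" combine)
    (rest'.map Prod.fst, rest'.map Prod.snd)
  else
    (section_names, sections)

-- ===== PRECONDITION & SPEC =====
def Spec_combine_equivalent_sections (section_names : List String) (sections : List String) (out : List String × List String) : Prop := out = combine_equivalent_sections_alt section_names sections
instance (section_names : List String) (sections : List String) (out : List String × List String) : Decidable (Spec_combine_equivalent_sections section_names sections out) := by unfold Spec_combine_equivalent_sections; infer_instance

-- ===== CLAIM (what is proved, stated in full; the proofs are below) =====
def Claim_equal_combine_equivalent_sections : Prop := ∀ (section_names : List String) (sections : List String), Dom_combine_equivalent_sections section_names sections → Spec_combine_equivalent_sections section_names sections (combine_equivalent_sections section_names sections)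

-- ===== LEMMAS AND PROOFS =====

theorem foldB_some (l : List (String × String)) (r : List (String × String)) (c : List String)
    (f : Nat × String) :
    l.foldl pvStepB (r, c, some f) =
      (r ++ l.filter (fun p => !decide (p.1 ∈ pvSynonyms)),
       c ++ (l.filter (fun p => decide (p.1 ∈ pvSynonyms))).map (fun p => pvFmt p.1 p.2),
       some f) := by
  induction l generalizing r c with
  | nil => simp
  | cons p tl ih =>
    by_cases hm : p.1 ∈ pvSynonyms
    · simp [List.foldl_cons, pvStepB, hm, ih]
    · simp [List.foldl_cons, pvStepB, hm, ih]

theorem foldB_none (l : List (String × String)) (r : List (String × String)) (c : List String) :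
    l.foldl pvStepB (r, c, none) =
      (r ++ l.filter (fun p => !decide (p.1 ∈ pvSynonyms)),
       c ++ (l.filter (fun p => decide (p.1 ∈ pvSynonyms))).map (fun p => pvFmt p.1 p.2),
       match l.filter (fun p => decide (p.1 ∈ pvSynonyms)) with
       | [] => none
       | q :: _ => some (r.length + (l.takeWhile (fun p => !decide (p.1 ∈ pvSynonyms))).length, q.1)) := by
  induction l generalizing r c with
  | nil => simp
  | cons p tl ih =>
    by_cases hm : p.1 ∈ pvSynonyms
    · simp [List.foldl_cons, pvStepB, hm, foldB_some]
    · have hstep : pvStepB (r, c, none) p = (r ++ [p], c, none) := by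
        simp [pvStepB, hm]
      rw [List.foldl_cons, hstep, ih]
      cases hft : tl.filter (fun p => decide (p.1 ∈ pvSynonyms)) with
      | nil => simp [hft, hm]
      | cons q tq => simp [hft, hm, Nat.add_comm, Nat.add_assoc]

-- A's index loop finds the first matching name; when the zipped pairs contain a match it
-- equals the number of non-matching pairs before it.
theorem findIdxA_eq (names : List String) (secs : List String) (i : Nat)
    (h : (names.zip secs).filter (fun p => decide (p.1 ∈ pvSynonyms)) ≠ []) :
    pvFindIdxA pvSynonyms names i =
      some (i + ((names.zip secs).takeWhile (fun p => !decide (p.1 ∈ pvSynonyms))).length) := by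
  induction names generalizing secs i with
  | nil => simp at h
  | cons n ns ih =>
    cases secs with
    | nil => simp at h
    | cons s ss =>
      by_cases hn : n ∈ pvSynonyms
      · simp [pvFindIdxA, hn]
      · have h' : (ns.zip ss).filter (fun p => decide (p.1 ∈ pvSynonyms)) ≠ [] := by
          simpa [List.filter_cons, hn] using h
        rw [pvFindIdxA, if_neg (by simpa using hn), ih ss (i + 1) h']
        simp [hn, Nat.add_comm, Nat.add_assoc]

-- ===== VERDICT (by name: the statement is the Claim_ definition above) =====
theorem combine_equivalent_sections_spec : Claim_equal_combine_equivalent_sections := by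
  intro names secs _
  show _ = _
  have hcanon : pvSynonyms.headD "" = "findings" := rfl
  unfold combine_equivalent_sections combine_equivalent_sections_alt pvStepA
  simp only [List.foldl_cons, List.foldl_nil, foldB_none, List.nil_append, List.length_nil,
    List.contains_eq_mem, hcanon]
  cases hf : (names.zip secs).filter (fun p => decide (p.1 ∈ pvSynonyms)) with
  | nil =>
    simp only [List.length_nil, List.headD_nil]
    norm_num
  | cons q tl =>
    simp only [List.headD_cons]
    have hidx := findIdxA_eq names secs 0 (by simp [hf])
    rw [hidx]
    simp only [Option.getD_some, Nat.zero_add, List.map_cons]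
    cases tl with
    | cons t ts =>
      rw [if_neg (by simp)]
      split_ifs with hb
      · rfl
      · exact absurd (by simp) hb
    | nil =>
      by_cases hq : q.1 = "findings"
      · rw [if_pos (by simp [hq])]
        split_ifs with hb
        · exact absurd hb (by simp [hq])
        · rfl
      · rw [if_neg (by simp [hq])]
        split_ifs with hb
        · rfl
        · exact absurd (by simp [hq]) hb
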